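-- pv_equiv track=rewrite | github.com/cn8HuaWu/cdt-cdp-data | misc/oss_data_upload.py | merge_osslog
-- ===== SOURCE A (Python) =====
-- def merge_osslog(new_log_list:list, exist_log_list:list) -> list:
--     if exist_log_list is None:
--         return new_log_list
--
--     rm_index_list = []
--     log_len = len(new_log_list)
--     new_log_list.extend(exist_log_list)
--
--     for i in range(0, log_len):
--         for j in range(0, len(exist_log_list)):
--             if exist_log_list[j] == new_log_list[i]:
--                 rm_index_list.append(i)
--                 # new_log_list.append(exist_log_list[i])
--                 # if  exist_log_list[j].status == FAILED:
--
--                 break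
--
--     for i in sorted(rm_index_list, reverse=True):
--         new_log_list.pop(i)
--
--
--     return new_log_list
-- ===== SOURCE B (Python) =====
-- def merge_osslog(new_log_list: list, exist_log_list: list) -> list:
--     if exist_log_list is None:
--         return new_log_list
--     kept = [x for x in new_log_list if not any(e == x for e in exist_log_list)]
--     new_log_list[:] = kept + exist_log_list
--     return new_log_list
-- ===== Notes on version B (the rewrite author's own statement) =====
-- stated objective: simpler
-- what changed: Replaces A's extend-then-index-scan-then-reverse-sorted-pop machinery with a single filter comprehension over the new entries followed by one in-place splice assignment (no index bookkeeping, no sort, no pops).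
import Mathlib
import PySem

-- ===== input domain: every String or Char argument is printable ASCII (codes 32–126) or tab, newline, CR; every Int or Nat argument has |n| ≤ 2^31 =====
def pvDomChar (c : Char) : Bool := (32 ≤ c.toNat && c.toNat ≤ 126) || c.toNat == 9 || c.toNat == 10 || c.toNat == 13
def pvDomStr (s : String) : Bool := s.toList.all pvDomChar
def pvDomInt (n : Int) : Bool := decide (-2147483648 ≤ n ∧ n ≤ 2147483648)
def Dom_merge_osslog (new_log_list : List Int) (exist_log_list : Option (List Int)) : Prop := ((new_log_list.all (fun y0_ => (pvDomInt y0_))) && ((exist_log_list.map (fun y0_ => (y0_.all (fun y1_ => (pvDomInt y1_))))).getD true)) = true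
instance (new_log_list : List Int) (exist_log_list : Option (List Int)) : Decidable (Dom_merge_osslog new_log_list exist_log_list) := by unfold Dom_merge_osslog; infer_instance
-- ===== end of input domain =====

-- B replaces A's extend / index-scan / reverse-sorted-pop machinery with one filter plus an append
-- (simpler decomposition). Both Pythons mutate new_log_list in place to the same final contents;
-- the theorems here are about the returned (= final) value.

-- ===== PORT A =====
-- All list indexing in A is by loop indices that are in range, so xs.getD i 0 is exact for xs[i];
-- the pop fallback branch is unreachable (indices come from range(log_len)).
def merge_osslog (new_log_list : List Int) (exist_log_list : Option (List Int)) : List Int :=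
  match exist_log_list with
  | none => new_log_list
  | some ex =>
    let logLen := new_log_list.length
    let nl := new_log_list ++ ex
    -- for i in range(0, log_len): for j in range(0, len(exist_log_list)): if ...: append i; break
    let rm : List Nat := (List.range logLen).foldl
      (fun acc i =>
        if (List.range ex.length).any (fun j => ex.getD j 0 == nl.getD i 0) then acc ++ [i]
        else acc) []
    -- for i in sorted(rm_index_list, reverse=True): new_log_list.pop(i)
    (PySem.List.sorted rm (fun x => x) true).foldl
      (fun (l : List Int) (i : Nat) =>
        match PySem.List.pop? l (i : Int) with
        | some r => r.2
        | none => l) nl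

-- ===== PORT B =====
def merge_osslog_alt (new_log_list : List Int) (exist_log_list : Option (List Int)) : List Int :=
  match exist_log_list with
  | none => new_log_list
  | some ex =>
    let kept := new_log_list.filter (fun x => !(ex.any (fun e => e == x)))
    kept ++ ex

-- ===== PRECONDITION & SPEC =====
def Spec_merge_osslog (new_log_list : List Int) (exist_log_list : Option (List Int)) (out : List Int) : Prop := out = merge_osslog_alt new_log_list exist_log_list
instance (new_log_list : List Int) (exist_log_list : Option (List Int)) (out : List Int) : Decidable (Spec_merge_osslog new_log_list exist_log_list out) := by unfold Spec_merge_osslog; infer_instance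

-- ===== CLAIM (what is proved, stated in full; the proofs are below) =====
def Claim_equal_merge_osslog : Prop := ∀ (new_log_list : List Int) (exist_log_list : Option (List Int)), Dom_merge_osslog new_log_list exist_log_list → Spec_merge_osslog new_log_list exist_log_list (merge_osslog new_log_list exist_log_list)

-- ===== LEMMAS AND PROOFS =====

-- an index scan over range(len(ex)) testing ex[j] is a scan over ex itself
lemma any_range_getD (ex : List Int) (f : Int → Bool) :
    (List.range ex.length).any (fun j => f (ex.getD j 0)) = ex.any f := by
  rw [Bool.eq_iff_iff]
  simp only [List.any_eq_true, List.mem_range]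
  constructor
  · rintro ⟨j, hj, h⟩
    exact ⟨ex[j], List.getElem_mem hj, by rwa [List.getD_eq_getElem _ _ hj] at h⟩
  · rintro ⟨x, hx, h⟩
    obtain ⟨j, hj, rfl⟩ := List.mem_iff_getElem.mp hx
    exact ⟨j, hj, by rwa [List.getD_eq_getElem _ _ hj]⟩

-- popping, from largest to smallest, the indices i < k whose element satisfies q
-- filters q out of the first k elements and leaves the rest
lemma popFold (q : Int → Bool) :
    ∀ (k : Nat) (l : List Int), k ≤ l.length →
    (((List.range k).filter (fun i => q (l.getD i 0))).reverse).foldl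
        (fun (l : List Int) (i : Nat) =>
          match PySem.List.pop? l (i : Int) with
          | some r => r.2
          | none => l) l
      = (l.take k).filter (fun x => !q x) ++ l.drop k := by
  intro k
  induction k with
  | zero => intro l _; simp
  | succ k ih =>
    intro l hk
    have hklt : k < l.length := hk
    rw [List.range_succ, List.filter_append, List.reverse_append, List.foldl_append]
    have hgetD : l.getD k 0 = l[k] := List.getD_eq_getElem _ _ hklt
    by_cases hq : q l[k]
    · have hfil : ([k].filter (fun i => q (l.getD i 0))) = [k] := by
        simp [List.getD, List.getElem?_eq_getElem hklt, hq]
      rw [hfil]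
      have hpop : PySem.List.pop? l (k : Int) = some (l[k], l.eraseIdx k) :=
        PySem.List.pop?_natCast l k hklt
      simp only [List.reverse_cons, List.reverse_nil, List.nil_append, List.foldl_cons,
        List.foldl_nil, hpop]
      set l' := l.eraseIdx k with hl'
      have hlen' : k ≤ l'.length := by
        rw [hl', List.length_eraseIdx_of_lt hklt]; omega
      have hsame : ((List.range k).filter (fun i => q (l.getD i 0)))
          = ((List.range k).filter (fun i => q (l'.getD i 0))) := by
        apply List.filter_congr
        intro i hi
        have hik : i < k := List.mem_range.mp hi
        have hil : i < l.length := by omega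
        have hil' : i < l'.length := by omega
        rw [List.getD_eq_getElem _ _ hil, List.getD_eq_getElem _ _ hil']
        congr 1
        exact (List.getElem_eraseIdx_of_lt hil' hik).symm
      rw [hsame, ih l' hlen']
      have htake : l'.take k = l.take k := by
        rw [hl', List.eraseIdx_eq_take_drop_succ, List.take_append]
        simp [List.length_take, Nat.min_eq_left (le_of_lt hklt), List.take_take]
      have hdrop : l'.drop k = l.drop (k + 1) := by
        have hlt : (l.take k).length = k := by
          simp [List.length_take, Nat.min_eq_left (le_of_lt hklt)]
        rw [hl', List.eraseIdx_eq_take_drop_succ]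
        exact List.drop_left' hlt
      rw [htake, hdrop]
      have htk : l.take (k + 1) = l.take k ++ [l[k]] := List.take_succ_eq_append_getElem hklt
      rw [htk, List.filter_append]
      simp [hq]
    · have hfil : ([k].filter (fun i => q (l.getD i 0))) = [] := by
        simp [List.getD, List.getElem?_eq_getElem hklt, hq]
      rw [hfil]
      simp only [List.reverse_nil, List.foldl_nil]
      rw [ih l (by omega)]
      have htk : l.take (k + 1) = l.take k ++ [l[k]] := List.take_succ_eq_append_getElem hklt
      have hdk : l.drop k = l[k] :: l.drop (k + 1) := List.drop_eq_getElem_cons hklt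
      rw [htk, List.filter_append, hdk]
      simp [hq]

-- ===== VERDICT (by name: the statement is the Claim_ definition above) =====
theorem merge_osslog_spec : Claim_equal_merge_osslog := by
  intro new_log_list exist_log_list _
  unfold Spec_merge_osslog merge_osslog merge_osslog_alt
  match exist_log_list with
  | none => rfl
  | some ex =>
    simp only
    set nl := new_log_list ++ ex with hnl
    set q : Int → Bool := fun v => ex.any (fun e => e == v) with hq
    have hrm : (List.range new_log_list.length).foldl
        (fun acc i =>
          if (List.range ex.length).any (fun j => ex.getD j 0 == nl.getD i 0) then acc ++ [i]
          else acc) []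
        = (List.range new_log_list.length).filter (fun i => q (nl.getD i 0)) := by
      have : ∀ i : Nat,
          ((List.range ex.length).any (fun j => ex.getD j 0 == nl.getD i 0))
            = q (nl.getD i 0) := by
        intro i; exact any_range_getD ex (fun e => e == nl.getD i 0)
      calc (List.range new_log_list.length).foldl
            (fun acc i =>
              if (List.range ex.length).any (fun j => ex.getD j 0 == nl.getD i 0) then acc ++ [i]
              else acc) []
          = (List.range new_log_list.length).foldl
            (fun acc i => if q (nl.getD i 0) then acc ++ [i] else acc) [] := by
              apply PySem.List.foldl_congr_mem
              intro acc i _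
              rw [this i]
        _ = [] ++ (List.range new_log_list.length).filter (fun i => q (nl.getD i 0)) :=
              PySem.List.foldl_append_if_eq_filter _ _ _
        _ = _ := List.nil_append _
    rw [hrm]
    set rmf := (List.range new_log_list.length).filter (fun i => q (nl.getD i 0)) with hrmf
    have hsort : PySem.List.sorted rmf (fun x => x) true = rmf.reverse := by
      apply PySem.List.sorted_rev_eq_of_perm_of_pairwise_gt
      · exact (rmf.reverse_perm)
      · rw [List.pairwise_reverse]
        exact List.Pairwise.filter _ (List.pairwise_lt_range)
    rw [hsort, hrmf]
    have hk : new_log_list.length ≤ nl.length := by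
      rw [hnl, List.length_append]; omega
    rw [popFold q new_log_list.length nl hk]
    rw [hnl, List.take_left, List.drop_left]
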